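-- pv_equiv track=rewrite | github.com/Irallia/IZW-HU-Parasites | simulation/non_binary_simulation/parsimony/Fitch_MP.py | get_intersect_or_union
-- ===== SOURCE A (Python) =====
-- TAGS = [0, 1]
--
-- def get_intersect_or_union(tags_list):
--     """returns the intersection of all list elements, if not empty"""
--     # Arguments:
--     #   tags_list - a list of tag_lists
--     #       tags_list[tag_list]
--     # pairwise intersection
--     tag_set = []
--     while len(tags_list) > 1:
--         tag_list_i = tags_list[0]
--         tag_list_j = tags_list[1]
--         # RULE 1: share any states in common -> assign shared states
--         # intersection:
--         tag_set = (set(tag_list_i) & set(tag_list_j))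
--         # RULE 2: no shared states -> assign union of states
--         if tag_set == set():
--             # union:
--             return TAGS
--         else:
--             tags_list.remove(tag_list_i) # same as
--             tags_list.remove(tag_list_j)
--             tags_list.append(list(tag_set))
--     return list(tag_set)
-- ===== SOURCE B (Python) =====
-- TAGS = [0, 1]
--
-- def get_intersect_or_union(tags_list):
--     """returns the intersection of all list elements, if not empty"""
--     # Single left-to-right pass with a running intersection set (A rebuilds a
--     # pairwise work queue). Does not mutate tags_list (A empties it in place).
--     if len(tags_list) <= 1:
--         return []
--     common = set(tags_list[0])
--     for tags in tags_list[1:]: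
--         common &= set(tags)
--         if not common:
--             return TAGS
--     return sorted(common)
-- ===== Notes on version B (the rewrite author's own statement) =====
-- stated objective: simpler
-- what changed: A repeatedly pops the first two lists of a work queue, intersects them and appends the result back (rescanning/rebuilding the queue each round, mutating the argument); B makes one left-to-right pass keeping a running intersection set and does not mutate the input list.
import Mathlib
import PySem

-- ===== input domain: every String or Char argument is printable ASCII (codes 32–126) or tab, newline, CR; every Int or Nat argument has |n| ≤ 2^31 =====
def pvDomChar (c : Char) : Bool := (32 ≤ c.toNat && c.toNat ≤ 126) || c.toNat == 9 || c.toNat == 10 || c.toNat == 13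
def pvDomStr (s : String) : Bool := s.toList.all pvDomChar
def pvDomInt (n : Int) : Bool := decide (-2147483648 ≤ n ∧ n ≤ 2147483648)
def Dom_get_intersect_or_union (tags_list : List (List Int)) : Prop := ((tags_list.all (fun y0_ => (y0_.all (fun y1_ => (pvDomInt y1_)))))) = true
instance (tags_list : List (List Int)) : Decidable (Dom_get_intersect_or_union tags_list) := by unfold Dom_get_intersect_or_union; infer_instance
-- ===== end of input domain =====

-- B replaces A's pairwise work-queue folding (which rescans and rebuilds the list each
-- round) by one left-to-right pass keeping a running intersection set: alternative/simpler.
-- Python A empties tags_list in place (remove/append); the equivalence proved here is about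
-- the RETURN value only (Python B does not mutate its argument).
-- Both Python functions return the final intersection via CPython's unspecified set
-- iteration order and the return value is compared AS A SET ('ret_compare: set'); both
-- ports therefore render the final 'list(tag_set)' / 'sorted(common)' canonically as the
-- sorted list of the set's elements (exact as a set; the set contents never depend on order).

-- ===== PORT A =====
def pyTAGS : List Int := [0, 1]

-- the 'while len(tags_list) > 1' loop of A; tag_set is the current value of A's tag_set
-- (as the set's element list), tags_list the current (mutated) work list.
def pyALoop (tags_list : List (List Int)) (tag_set : List Int) : List Int :=
  match tags_list with
  | tag_list_i :: tag_list_j :: rest =>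
      -- tag_set = set(tag_list_i) & set(tag_list_j)
      let s : PySem.Set Int :=
        PySem.Set.inter (PySem.Set.ofList tag_list_i) (PySem.Set.ofList tag_list_j)
      if PySem.Set.equal s PySem.Set.empty then pyTAGS
      else
        -- tags_list.remove(tag_list_i); tags_list.remove(tag_list_j); tags_list.append(list(tag_set))
        pyALoop (rest ++ [s]) s
  | _ => PySem.List.sorted tag_set (fun x => x) false   -- return list(tag_set), rendered sorted
termination_by tags_list.length
decreasing_by simp

def get_intersect_or_union (tags_list : List (List Int)) : List Int :=
  pyALoop tags_list []

-- ===== PORT B =====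
-- the 'for tags in tags_list[1:]' loop of B with running intersection 'common'
def pyBLoop (common : PySem.Set Int) (rest : List (List Int)) : List Int :=
  match rest with
  | [] => PySem.List.sorted common (fun x => x) false    -- return sorted(common)
  | tags :: ts =>
      let c : PySem.Set Int := PySem.Set.inter common (PySem.Set.ofList tags)
      if PySem.Set.equal c PySem.Set.empty then pyTAGS
      else pyBLoop c ts

def get_intersect_or_union_alt (tags_list : List (List Int)) : List Int :=
  match tags_list with
  | [] => []
  | [_] => []
  | t0 :: rest => pyBLoop (PySem.Set.ofList t0) rest

-- ===== PRECONDITION & SPEC =====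
def Spec_get_intersect_or_union (tags_list : List (List Int)) (out : List Int) : Prop := out = get_intersect_or_union_alt tags_list
instance (tags_list : List (List Int)) (out : List Int) : Decidable (Spec_get_intersect_or_union tags_list out) := by unfold Spec_get_intersect_or_union; infer_instance

-- ===== CLAIM (what is proved, stated in full; the proofs are below) =====
def Claim_equal_get_intersect_or_union : Prop := ∀ (tags_list : List (List Int)), Dom_get_intersect_or_union tags_list → Spec_get_intersect_or_union tags_list (get_intersect_or_union tags_list)

-- ===== LEMMAS AND PROOFS =====

theorem pySet_equal_empty (s : PySem.Set Int) :
    PySem.Set.equal s PySem.Set.empty = true ↔ s = [] := by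
  simp [PySem.Set.equal, PySem.Set.issubset, PySem.Set.empty,
        List.eq_nil_iff_forall_not_mem]

-- A's queue loop computes (some nodup list of) the common elements of all queued lists,
-- returned sorted, or pyTAGS when that set is empty.
theorem pyALoop_char : ∀ (n : Nat) (q : List (List Int)) (t : List Int),
    q.length ≤ n → 2 ≤ q.length →
    ∃ L : List Int, L.Nodup ∧ (∀ x, x ∈ L ↔ ∀ l ∈ q, x ∈ l) ∧
      pyALoop q t = (if L = [] then pyTAGS else PySem.List.sorted L (fun x => x) false) := by
  intro n
  induction n with
  | zero => intro q t h1 h2; omega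
  | succ n ih =>
    intro q t hlen h2
    match q with
    | tag_list_i :: tag_list_j :: rest =>
      set s : PySem.Set Int :=
        PySem.Set.inter (PySem.Set.ofList tag_list_i) (PySem.Set.ofList tag_list_j) with hs
      have hmem : ∀ x, x ∈ s ↔ x ∈ tag_list_i ∧ x ∈ tag_list_j := by
        intro x
        rw [hs, PySem.Set.mem_inter, PySem.Set.mem_ofList, PySem.Set.mem_ofList]
      have hnodup : s.Nodup := PySem.Set.nodup_inter _ _ (PySem.Set.nodup_ofList _)
      by_cases hemp : PySem.Set.equal s PySem.Set.empty = true
      · refine ⟨[], List.nodup_nil, ?_, ?_⟩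
        · intro x
          have hse : s = [] := (pySet_equal_empty s).1 hemp
          simp only [List.not_mem_nil, false_iff]
          intro h
          have : x ∈ s := (hmem x).2 ⟨h tag_list_i (by simp), h tag_list_j (by simp)⟩
          simp [hse] at this
        · rw [pyALoop, ← hs, if_pos hemp]; simp
      · have hstep : pyALoop (tag_list_i :: tag_list_j :: rest) t = pyALoop (rest ++ [s]) s := by
          rw [pyALoop, ← hs, if_neg hemp]
        match rest with
        | [] =>
          refine ⟨s, hnodup, ?_, ?_⟩
          · intro x; rw [hmem]; simp
          · have hne : s ≠ [] := fun h => hemp ((pySet_equal_empty s).2 h)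
            rw [hstep, pyALoop, if_neg hne]
            simp
        | r :: rs =>
          obtain ⟨L, hL1, hL2, hL3⟩ :=
            ih ((r :: rs) ++ [s]) s (by simp at hlen ⊢; omega) (by simp)
          refine ⟨L, hL1, ?_, ?_⟩
          · intro x
            rw [hL2 x]
            constructor
            · intro h l hl
              have hxs : x ∈ s := h s (by simp)
              rcases (hmem x).1 hxs with ⟨hi, hj⟩
              rcases List.mem_cons.1 hl with h1 | h1
              · exact h1 ▸ hi
              · rcases List.mem_cons.1 h1 with h2 | h2
                · exact h2 ▸ hj
                · exact h l (by rcases List.mem_cons.1 h2 with h3 | h3 <;> simp [h3])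
            · intro h l hl
              simp at hl
              rcases hl with h1 | h1 | h1
              · exact h l (by simp [h1])
              · exact h l (by simp [h1])
              · subst h1
                exact (hmem x).2 ⟨h tag_list_i (by simp), h tag_list_j (by simp)⟩
          · rw [hstep, hL3]

-- B's single pass computes (some nodup list of) the elements of 'common' lying in every
-- remaining list, returned sorted, or pyTAGS when that set is empty.
theorem pyBLoop_char : ∀ (ts : List (List Int)) (common : PySem.Set Int), common.Nodup →
    (common ≠ [] ∨ ts ≠ []) →
    ∃ L : List Int, L.Nodup ∧ (∀ x, x ∈ L ↔ x ∈ common ∧ ∀ l ∈ ts, x ∈ l) ∧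
      pyBLoop common ts = (if L = [] then pyTAGS else PySem.List.sorted L (fun x => x) false) := by
  intro ts
  induction ts with
  | nil =>
    intro common hnd hne
    have hce : common ≠ [] := hne.resolve_right (by simp)
    refine ⟨common, hnd, by simp, ?_⟩
    rw [pyBLoop, if_neg hce]
  | cons tags ts ih =>
    intro common hnd _
    set c : PySem.Set Int := PySem.Set.inter common (PySem.Set.ofList tags) with hc
    have hmem : ∀ x, x ∈ c ↔ x ∈ common ∧ x ∈ tags := by
      intro x; rw [hc, PySem.Set.mem_inter, PySem.Set.mem_ofList]
    have hnodup : c.Nodup := PySem.Set.nodup_inter _ _ hnd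
    by_cases hemp : PySem.Set.equal c PySem.Set.empty = true
    · refine ⟨[], List.nodup_nil, ?_, ?_⟩
      · intro x
        have hce : c = [] := (pySet_equal_empty c).1 hemp
        simp only [List.not_mem_nil, false_iff]
        rintro ⟨h1, h2⟩
        have : x ∈ c := (hmem x).2 ⟨h1, h2 tags (by simp)⟩
        simp [hce] at this
      · rw [pyBLoop, ← hc, if_pos hemp]; simp
    · have hcne : c ≠ [] := fun h => hemp ((pySet_equal_empty c).2 h)
      obtain ⟨L, hL1, hL2, hL3⟩ := ih c hnodup (Or.inl hcne)
      refine ⟨L, hL1, ?_, ?_⟩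
      · intro x
        rw [hL2 x, hmem x]
        constructor
        · rintro ⟨⟨h1, h2⟩, h3⟩
          exact ⟨h1, fun l hl => by
            rcases List.mem_cons.1 hl with h | h
            · exact h ▸ h2
            · exact h3 l h⟩
        · rintro ⟨h1, h2⟩
          exact ⟨⟨h1, h2 tags (by simp)⟩, fun l hl => h2 l (by simp [hl])⟩
      · rw [pyBLoop, ← hc, if_neg hemp, hL3]

-- two nodup lists with the same members sort to the same list
theorem sorted_eq_of_same_mem (L₁ L₂ : List Int) (h1 : L₁.Nodup) (h2 : L₂.Nodup)
    (h : ∀ x, x ∈ L₁ ↔ x ∈ L₂) :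
    PySem.List.sorted L₁ (fun x => x) false = PySem.List.sorted L₂ (fun x => x) false :=
  PySem.List.sorted_eq_sorted_of_perm L₁ L₂ (fun x => x) (fun _ _ hxy => hxy)
    ((List.perm_ext_iff_of_nodup h1 h2).2 h)

-- ===== VERDICT (by name: the statement is the Claim_ definition above) =====
theorem get_intersect_or_union_spec : Claim_equal_get_intersect_or_union := by
  intro tags_list _
  unfold Spec_get_intersect_or_union
  match tags_list with
  | [] =>
    show pyALoop [] [] = get_intersect_or_union_alt []
    rw [pyALoop]
    · simp [get_intersect_or_union_alt, PySem.List.sorted]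
    · simp
  | [t] =>
    show pyALoop [t] [] = get_intersect_or_union_alt [t]
    rw [pyALoop]
    · simp [get_intersect_or_union_alt, PySem.List.sorted]
    · simp
  | t0 :: t1 :: rest =>
    obtain ⟨LA, hA1, hA2, hA3⟩ :=
      pyALoop_char (t0 :: t1 :: rest).length (t0 :: t1 :: rest) [] (le_refl _) (by simp)
    obtain ⟨LB, hB1, hB2, hB3⟩ :=
      pyBLoop_char (t1 :: rest) (PySem.Set.ofList t0) (PySem.Set.nodup_ofList _) (Or.inr (by simp))
    have hsame : ∀ x, x ∈ LA ↔ x ∈ LB := by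
      intro x
      rw [hA2 x, hB2 x, PySem.Set.mem_ofList]
      constructor
      · intro h
        exact ⟨h t0 (by simp), fun l hl => h l (by simp [hl])⟩
      · rintro ⟨h1, h2⟩ l hl
        rcases List.mem_cons.1 hl with h | h
        · exact h ▸ h1
        · exact h2 l h
    have hnil : (LA = []) ↔ (LB = []) := by
      simp only [List.eq_nil_iff_forall_not_mem]
      exact ⟨fun h x hx => h x ((hsame x).2 hx), fun h x hx => h x ((hsame x).1 hx)⟩
    show pyALoop (t0 :: t1 :: rest) [] = pyBLoop (PySem.Set.ofList t0) (t1 :: rest)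
    rw [hA3, hB3]
    by_cases hLA : LA = []
    · simp [hLA, hnil.1 hLA]
    · have hLB : LB ≠ [] := fun h => hLA (hnil.2 h)
      rw [if_neg hLA, if_neg hLB]
      exact sorted_eq_of_same_mem LA LB hA1 hB1 hsame
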